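-- pv_equiv track=rewrite | github.com/RamenDR/ramen | test/drenv/stress/metrics.py | _select_charts
-- ===== SOURCE A (Python) =====
-- PREFERRED_CHARTS = [
--     # System-wide metrics
--     "system.cpu",
--     "system.ram",
--     "system.io",
--     "system.load",
--     "system.swap",
--     "system.processes",
--     "system.ctxt",
--     "system.intr",
--     "system.net",
--     # Memory metrics
--     "mem.swap",
--     "mem.pgfaults",
--     # Per-application metrics (Linux only, requires apps.plugin)
--     "apps.cpu",
--     "apps.mem",
--     "apps.io_read",
--     "apps.io_write",
--     "apps.processes",
-- ]
--
-- AUTO_DISCOVER_PREFIXES = [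
--     "net.",
--     "disk.",
-- ]
--
-- def _select_charts(available_charts):
--     """
--     Select charts to export based on what's available.
--
--     Filters PREFERRED_CHARTS to only include charts that exist on the
--     current system, and auto-discovers network and disk interface charts
--     which have platform-specific names.
--     """
--     charts = []
--
--     for chart in PREFERRED_CHARTS:
--         if chart in available_charts:
--             charts.append(chart)
--
--     for prefix in AUTO_DISCOVER_PREFIXES:
--         for chart in sorted(available_charts):
--             if chart.startswith(prefix) and chart not in charts:
--                 charts.append(chart)
--
--     return charts
-- ===== SOURCE B (Python) =====
-- PREFERRED_CHARTS = [
--     "system.cpu",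
--     "system.ram",
--     "system.io",
--     "system.load",
--     "system.swap",
--     "system.processes",
--     "system.ctxt",
--     "system.intr",
--     "system.net",
--     "mem.swap",
--     "mem.pgfaults",
--     "apps.cpu",
--     "apps.mem",
--     "apps.io_read",
--     "apps.io_write",
--     "apps.processes",
-- ]
--
-- AUTO_DISCOVER_PREFIXES = [
--     "net.",
--     "disk.",
-- ]
--
--
-- def _select_charts(available_charts):
--     charts = [c for c in PREFERRED_CHARTS if c in available_charts]
--     for prefix in AUTO_DISCOVER_PREFIXES:
--         charts += sorted({c for c in available_charts if c.startswith(prefix)})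
--     return charts
-- ===== Notes on version B (the rewrite author's own statement) =====
-- stated objective: faster
-- what changed: Phase 2 no longer re-scans sorted(available_charts) with an O(result)-cost 'not in charts' list-membership dedup per prefix; instead each prefix's matching charts are collected into a set (one-pass dedup) and appended in sorted order, so only the matching charts are sorted.
import Mathlib
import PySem

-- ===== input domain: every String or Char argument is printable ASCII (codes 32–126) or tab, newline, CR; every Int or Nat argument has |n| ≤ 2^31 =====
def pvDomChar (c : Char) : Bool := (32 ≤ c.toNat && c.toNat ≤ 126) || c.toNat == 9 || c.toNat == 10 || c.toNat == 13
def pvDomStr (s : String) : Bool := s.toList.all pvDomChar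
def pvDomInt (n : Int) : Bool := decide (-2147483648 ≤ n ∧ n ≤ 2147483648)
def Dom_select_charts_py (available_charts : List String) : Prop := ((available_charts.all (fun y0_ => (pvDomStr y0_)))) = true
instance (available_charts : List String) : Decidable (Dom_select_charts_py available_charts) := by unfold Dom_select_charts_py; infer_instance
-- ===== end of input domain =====

-- B replaces A's per-prefix rescan of sorted(available_charts) with a 'not in charts' list dedup
-- by sorting a per-prefix set comprehension (simpler emission, set-based dedup).

def PREFERRED_CHARTS : List String :=
  ["system.cpu", "system.ram", "system.io", "system.load", "system.swap",
   "system.processes", "system.ctxt", "system.intr", "system.net",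
   "mem.swap", "mem.pgfaults",
   "apps.cpu", "apps.mem", "apps.io_read", "apps.io_write", "apps.processes"]

def AUTO_DISCOVER_PREFIXES : List String := ["net.", "disk."]

-- ===== PORT A =====
def select_charts_py (available_charts : List String) : List String :=
  let charts : List String := []
  let charts := PREFERRED_CHARTS.foldl
    (fun charts chart => if chart ∈ available_charts then charts ++ [chart] else charts) charts
  let charts := AUTO_DISCOVER_PREFIXES.foldl
    (fun charts pfx =>
      (PySem.List.sorted available_charts (fun x => x) false).foldl
        (fun charts chart =>
          if PySem.Str.startswith chart pfx = true ∧ chart ∉ charts then charts ++ [chart]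
          else charts)
        charts)
    charts
  charts

-- ===== PORT B =====
def select_charts_py_alt (available_charts : List String) : List String :=
  let charts := PREFERRED_CHARTS.filter (fun c => decide (c ∈ available_charts))
  AUTO_DISCOVER_PREFIXES.foldl
    (fun charts pfx =>
      charts ++ PySem.List.sorted
        (PySem.Set.ofList (available_charts.filter (fun c => PySem.Str.startswith c pfx)))
        (fun x => x) false)
    charts

-- ===== PRECONDITION & SPEC =====
def Spec_select_charts_py (available_charts : List String) (out : List String) : Prop := out = select_charts_py_alt available_charts
instance (available_charts : List String) (out : List String) : Decidable (Spec_select_charts_py available_charts out) := by unfold Spec_select_charts_py; infer_instance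

-- ===== CLAIM (what is proved, stated in full; the proofs are below) =====
def Claim_equal_select_charts_py : Prop := ∀ (available_charts : List String), Dom_select_charts_py available_charts → Spec_select_charts_py available_charts (select_charts_py available_charts)

-- ===== LEMMAS AND PROOFS =====

theorem dedup_sublist (xs : List String) : (PySem.List.dedup xs).Sublist xs := by
  simp only [PySem.List.dedup_eq_ofList]
  induction xs with
  | nil => simp [PySem.Set.ofList_nil]
  | cons x xs ih =>
    rw [PySem.Set.ofList_cons]
    refine List.Sublist.cons₂ x ?_
    simp only [PySem.Set.discard]
    exact List.Sublist.trans List.filter_sublist ih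

theorem not_both_prefixes (c : String) (h : PySem.Str.startswith c "disk." = true) :
    PySem.Str.startswith c "net." = false := by
  by_contra hne
  rw [Bool.not_eq_false] at hne
  simp only [PySem.Str.startswith_eq] at h hne
  rw [PySem.Chars.startswith_iff] at h hne
  have := List.prefix_of_prefix_length_le hne h (by decide)
  revert this; decide

theorem dedup_filter_sorted (P : String → Bool) (avail : List String) :
    PySem.List.sorted (PySem.Set.ofList (avail.filter P)) (fun x => x) false
      = PySem.List.dedup ((PySem.List.sorted avail (fun x => x) false).filter P) := by
  apply PySem.List.sorted_eq_of_perm_of_pairwise_lt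
  · refine (List.perm_ext_iff_of_nodup (PySem.List.nodup_dedup _) (PySem.Set.nodup_ofList _)).2 ?_
    intro c
    simp [List.mem_filter, PySem.List.mem_sorted, PySem.Set.mem_ofList]
  · have hle : ((PySem.List.sorted avail (fun x => x) false).filter P).Pairwise (· ≤ ·) :=
      List.Pairwise.sublist List.filter_sublist (PySem.List.sorted_pairwise avail (fun x => x))
    have hle' := List.Pairwise.sublist (dedup_sublist _) hle
    have hne : (PySem.List.dedup ((PySem.List.sorted avail (fun x => x) false).filter P)).Pairwise (· ≠ ·) :=
      PySem.List.nodup_dedup _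
    exact (hle'.and hne).imp (fun h => lt_of_le_of_ne h.1 h.2)

theorem foldl_dedup_append (P : String → Bool) (s : List String) (acc : List String) :
    s.foldl (fun acc c => if P c = true ∧ c ∉ acc then acc ++ [c] else acc) acc
      = acc ++ (PySem.List.dedup (s.filter P)).filter (fun c => decide (c ∉ acc)) := by
  induction s generalizing acc with
  | nil => simp [PySem.List.dedup]
  | cons c s ih =>
    simp only [List.foldl_cons]
    by_cases hP : P c = true
    · have hfil : (c :: s).filter P = c :: s.filter P := by simp [hP]
      rw [hfil]
      simp only [PySem.List.dedup_eq_ofList] at *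
      rw [PySem.Set.ofList_cons]
      by_cases hc : c ∈ acc
      · rw [if_neg (by simp [hc])]
        rw [ih]
        congr 1
        simp only [List.filter_cons, decide_eq_true_eq]
        rw [if_neg (by simp [hc])]
        simp only [PySem.Set.discard, List.filter_filter]
        apply List.filter_congr
        intro x hx
        by_cases hxc : x = c <;> by_cases hxa : x ∈ acc <;> simp [hxc, hxa, hc] at *
      · rw [if_pos ⟨hP, hc⟩, ih]
        simp only [List.append_assoc, List.singleton_append]
        congr 1
        simp only [List.filter_cons, decide_eq_true_eq]
        rw [if_pos hc]
        congr 1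
        simp only [PySem.Set.discard, List.filter_filter]
        apply List.filter_congr
        intro x hx
        by_cases hxc : x = c <;> by_cases hxa : x ∈ acc <;> simp [hxc, hxa]
    · have hfil : (c :: s).filter P = s.filter P := by simp [hP]
      rw [hfil, if_neg (by simp [hP]), ih]

theorem preferred_no_prefix (c : String) (hc : c ∈ PREFERRED_CHARTS) (p : String)
    (hp : p ∈ AUTO_DISCOVER_PREFIXES) : PySem.Str.startswith c p = false := by
  fin_cases hp <;> fin_cases hc <;> decide

-- the same loop when no P-element is already in acc: it appends dedup(filter P s).
theorem foldl_dedup_append' (P : String → Bool) (s acc : List String)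
    (h : ∀ c ∈ PySem.List.dedup (s.filter P), c ∉ acc) :
    s.foldl (fun acc c => if P c = true ∧ c ∉ acc then acc ++ [c] else acc) acc
      = acc ++ PySem.List.dedup (s.filter P) := by
  rw [foldl_dedup_append]
  congr 1
  exact List.filter_eq_self.2 (fun a ha => by simpa using h a ha)

-- ===== VERDICT (by name: the statement is the Claim_ definition above) =====
theorem select_charts_py_spec : Claim_equal_select_charts_py := by
  intro avail _
  unfold Spec_select_charts_py select_charts_py select_charts_py_alt
  simp only [AUTO_DISCOVER_PREFIXES, List.foldl_cons, List.foldl_nil]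
  rw [PySem.List.foldl_append_ite_eq_filter]
  simp only [List.nil_append]
  have hnet : ∀ c ∈ PySem.List.dedup ((PySem.List.sorted avail (fun x => x) false).filter
      (fun chart => PySem.Str.startswith chart "net.")),
      c ∉ List.filter (fun x => decide (x ∈ avail)) PREFERRED_CHARTS := by
    intro a ha hmem
    rw [PySem.List.mem_dedup, List.mem_filter] at ha
    have hpref := preferred_no_prefix a (List.mem_filter.1 hmem).1 "net." (by decide)
    rw [hpref] at ha
    exact Bool.false_ne_true ha.2
  rw [foldl_dedup_append' _ _ _ hnet]
  have hdisk : ∀ c ∈ PySem.List.dedup ((PySem.List.sorted avail (fun x => x) false).filter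
      (fun chart => PySem.Str.startswith chart "disk.")),
      c ∉ List.filter (fun x => decide (x ∈ avail)) PREFERRED_CHARTS ++
        PySem.List.dedup ((PySem.List.sorted avail (fun x => x) false).filter
          (fun chart => PySem.Str.startswith chart "net.")) := by
    intro a ha hmem
    rw [PySem.List.mem_dedup, List.mem_filter] at ha
    rcases List.mem_append.1 hmem with hmem | hmem
    · have hpref := preferred_no_prefix a (List.mem_filter.1 hmem).1 "disk." (by decide)
      rw [hpref] at ha
      exact Bool.false_ne_true ha.2
    · rw [PySem.List.mem_dedup, List.mem_filter] at hmem
      have hnb := not_both_prefixes a ha.2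
      rw [hnb] at hmem
      exact Bool.false_ne_true hmem.2
  rw [foldl_dedup_append' _ _ _ hdisk]
  rw [dedup_filter_sorted, dedup_filter_sorted, List.append_assoc]
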